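-- pv_equiv track=rewrite | github.com/zarifmahmud/aqi-bot | aqiscraper_bot.py | comment_after
-- ===== SOURCE A (Python) =====
-- def comment_after(comment, target):
--     """
--     Finds where /u/aqi-bot is mentioned in the comment, and then figures out the city from there.
--     The parameter comment is a list, the parsed version of the comment used in the main program.
--     Because many cities have multiple words (i.e. New Delhi, San Francisco), instead of just returning
--     the word that comes after the mention of /u/aqi-bot, this function insteads first checks if the
--     word following the mention contains a quote, and then looks for the second quote in the following words,
--     adding any words in between to the city name.
--     """
--     charset = ["'", '"']
--     targetindex = comment.index(target)
--     count = 0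
--     track = 0
--     indextracker = targetindex + 1
--     cityname = []
--     for char in comment[indextracker]:  # This loop checks if the first word after the mention has a quote.
--         if char in charset:
--             track += 1
--     if track > 0:
--         cityname.append(comment[indextracker])
--     if track == 1:  # This loop looks for the closing quote, if the word only has one,
--                     # adding words in between to the city name.
--         indextracker += 1
--         while indextracker < len(comment) and count < 1:
--             cityname.append(comment[indextracker])
--             for char in comment[indextracker]:
--                 if char in charset:
--                     count += 1
--             indextracker += 1
--     return " ".join(cityname) if len(cityname) > 0 else None
-- ===== SOURCE B (Python) =====
-- def comment_after(comment, target):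
--     rest = comment[comment.index(target) + 1:]
--     counts = [sum(ch in "'\"" for ch in w) for w in rest]
--     if counts[0] == 0:  # IndexError here when the mention is the last element, as in A
--         return None
--     end = len(rest)
--     total = 0
--     for i, c in enumerate(counts):
--         total += c
--         if total >= 2:
--             end = i + 1
--             break
--     return " ".join(rest[:end])
-- ===== Notes on version B (the rewrite author's own statement) =====
-- stated objective: alternative
-- what changed: Replaces A's staged track/count state machine (count quotes in the first word, branch on track, then an index-driven while that appends and re-counts) with a map/reduce formulation: map every tail word to its quote count once, then one uniform rule picks end = the smallest prefix whose cumulative quote total reaches 2 (else the whole tail) and the answer is the slice rest[:end] joined, with None exactly when the first count is 0.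
import Mathlib
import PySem

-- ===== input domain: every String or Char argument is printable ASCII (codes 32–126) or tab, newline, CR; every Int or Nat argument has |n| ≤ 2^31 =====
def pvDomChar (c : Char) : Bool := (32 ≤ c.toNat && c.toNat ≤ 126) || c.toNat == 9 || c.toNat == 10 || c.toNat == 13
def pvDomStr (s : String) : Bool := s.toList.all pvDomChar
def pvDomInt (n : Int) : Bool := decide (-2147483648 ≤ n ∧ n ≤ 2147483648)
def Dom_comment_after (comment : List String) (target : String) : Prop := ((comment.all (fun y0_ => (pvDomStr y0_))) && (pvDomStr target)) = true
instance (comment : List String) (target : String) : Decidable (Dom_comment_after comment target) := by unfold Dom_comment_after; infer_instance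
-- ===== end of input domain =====

-- B: per-word quote counts mapped once, then one uniform threshold rule (smallest prefix of the
-- tail whose cumulative quote total reaches 2, sliced and joined) replacing A's track/count
-- branches and index-driven while loop (same cost).


-- ===== PORT A =====
-- char in charset, charset = ["'", '"']
def pvIsQuote (c : Char) : Bool := c == '\'' || c == '"'

-- the for-loops 'for char in w: if char in charset: k += 1' starting from k
def pvQuoteFold (w : String) (k : Nat) : Nat :=
  w.toList.foldl (fun t c => if pvIsQuote c then t + 1 else t) k

-- the while loop: while indextracker < len(comment) and count < 1: append word, count its quotes
def pvWhileA (comment : List String) (it : Nat) (count : Nat) (city : List String) :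
    List String :=
  if h : it < comment.length ∧ count < 1 then
    pvWhileA comment (it + 1) (pvQuoteFold comment[it] count) (city ++ [comment[it]])
  else city
termination_by comment.length - it

def comment_after (comment : List String) (target : String) : Option String :=
  match PySem.List.index? comment target with
  | none => none            -- ValueError: outside Pre_
  | some targetindex =>
    let indextracker := targetindex + 1
    match PySem.List.pyGet? comment (indextracker : Int) with
    | none => none          -- IndexError on comment[indextracker]: outside Pre_
    | some w1 =>
      let track := pvQuoteFold w1 0
      let cityname : List String := if track > 0 then [w1] else []
      let cityname : List String :=
        if track = 1 then pvWhileA comment (indextracker + 1) 0 cityname else cityname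
      if cityname.length > 0 then some (PySem.Str.join " " cityname) else none

-- ===== PORT B =====
-- sum(ch in "'\"" for ch in w)
def pvQuoteSum (w : String) : Nat :=
  (w.toList.map (fun c => if pvIsQuote c then 1 else 0)).sum

-- the for-with-break over enumerate(counts): end = i+1 at the first index where the running
-- total reaches 2, else the default (len(rest))
def pvEndLoop (counts : List Nat) (i : Nat) (total : Nat) (dflt : Nat) : Nat :=
  match counts with
  | [] => dflt
  | c :: cs => if total + c ≥ 2 then i + 1 else pvEndLoop cs (i + 1) (total + c) dflt

def comment_after_alt (comment : List String) (target : String) : Option String :=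
  match PySem.List.index? comment target with
  | none => none            -- ValueError: outside Pre_
  | some ti =>
    let rest := PySem.List.slice comment (some ((ti : Int) + 1)) none
    let counts := rest.map pvQuoteSum
    match PySem.List.pyGet? counts (0 : Int) with
    | none => none          -- IndexError on counts[0]: outside Pre_
    | some c0 =>
      if c0 = 0 then none
      else
        let e := pvEndLoop counts 0 0 rest.length
        some (PySem.Str.join " " (rest.take e))   -- rest[:end] with 0 ≤ end ≤ len(rest)

-- ===== PRECONDITION & SPEC =====
-- Pre_: A raises ValueError when target is absent and IndexError when the first occurrence of
-- target is the last element; exactly those inputs are excluded (A returns on everything else).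
def Pre_comment_after (comment : List String) (target : String) : Prop :=
  target ∈ comment ∧ comment.idxOf target + 1 < comment.length
instance (comment : List String) (target : String) : Decidable (Pre_comment_after comment target) := by unfold Pre_comment_after; infer_instance

def pvWitness_comment_after : List String × String := (["hi", "bot", "'New", "Delhi'"], "bot")

def Spec_comment_after (comment : List String) (target : String) (out : Option String) : Prop := out = comment_after_alt comment target
instance (comment : List String) (target : String) (out : Option String) : Decidable (Spec_comment_after comment target out) := by unfold Spec_comment_after; infer_instance

-- ===== CLAIM (what is proved, stated in full; the proofs are below) =====
def Claim_equal_comment_after : Prop := ∀ (comment : List String) (target : String), Dom_comment_after comment target → Pre_comment_after comment target → Spec_comment_after comment target (comment_after comment target)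

-- ===== LEMMAS AND PROOFS =====

theorem pvQuoteFold_eq (w : String) (k : Nat) :
    pvQuoteFold w k = k + w.toList.countP pvIsQuote := by
  unfold pvQuoteFold
  induction w.toList generalizing k with
  | nil => simp
  | cons c cs ih =>
    simp only [List.foldl_cons, List.countP_cons, ih]
    by_cases h : pvIsQuote c <;> (simp [h]; try omega)

theorem pvQuoteSum_eq (w : String) :
    pvQuoteSum w = w.toList.countP pvIsQuote := by
  unfold pvQuoteSum
  induction w.toList with
  | nil => simp
  | cons c cs ih =>
    simp only [List.map_cons, List.sum_cons, List.countP_cons, ih]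
    by_cases h : pvIsQuote c <;> (simp [h]; try omega)

-- A-side scan, extracted from the while loop: take words up to and including the first
-- word containing a quote
def pvScanA : List String → List String
  | [] => []
  | w :: ws => w :: (if w.toList.any pvIsQuote then [] else pvScanA ws)

theorem pvAny_iff (l : List Char) : l.any pvIsQuote = true ↔ l.countP pvIsQuote ≠ 0 := by
  rw [List.any_eq_true, Ne, List.countP_eq_zero]
  simp

theorem pvWhileA_stop (comment : List String) (it count : Nat) (city : List String)
    (h : 1 ≤ count) : pvWhileA comment it count city = city := by
  rw [pvWhileA, dif_neg (by omega)]

theorem pvWhileA_eq (comment : List String) (it : Nat) (city : List String) :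
    pvWhileA comment it 0 city = city ++ pvScanA (comment.drop it) := by
  by_cases h : it < comment.length
  · rw [pvWhileA]
    have hd : comment.drop it = comment[it] :: comment.drop (it + 1) :=
      List.drop_eq_getElem_cons h
    rw [dif_pos ⟨h, by omega⟩, hd]
    by_cases hq : comment[it].toList.any pvIsQuote = true
    · have : 1 ≤ pvQuoteFold comment[it] 0 := by
        rw [pvQuoteFold_eq]
        have := (pvAny_iff _).mp hq
        omega
      rw [pvWhileA_stop _ _ _ _ this]
      simp [pvScanA, hq]
    · have h0 : pvQuoteFold comment[it] 0 = 0 := by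
        rw [pvQuoteFold_eq]
        have : comment[it].toList.countP pvIsQuote = 0 := by
          by_contra hc
          exact hq ((pvAny_iff _).mpr hc)
        omega
      rw [h0, pvWhileA_eq comment (it + 1) (city ++ [comment[it]])]
      simp [pvScanA, hq]
  · rw [pvWhileA]
    rw [dif_neg (by omega)]
    rw [List.drop_eq_nil_of_le (by omega)]
    simp [pvScanA]
termination_by comment.length - it

-- result of the end loop never falls below the current index (dflt = i + counts.length throughout)
theorem pvEndLoop_ge (counts : List Nat) : ∀ (i total : Nat),
    i ≤ pvEndLoop counts i total (i + counts.length) := by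
  induction counts with
  | nil => intro i total; simp [pvEndLoop]
  | cons c cs ih =>
    intro i total
    rw [pvEndLoop]
    split
    · omega
    · have h := ih (i + 1) (total + c)
      have hd : i + (c :: cs).length = (i + 1) + cs.length := by simp; omega
      rw [hd]
      omega

-- with the running total already at 1, the take of the end-loop's result equals A's scan
theorem pvEndLoop_take (ws : List String) (i : Nat) :
    ws.take (pvEndLoop (ws.map pvQuoteSum) i 1 (i + ws.length) - i) = pvScanA ws := by
  induction ws generalizing i with
  | nil => simp [pvEndLoop, pvScanA]
  | cons w ws ih =>
    rw [List.map_cons, pvEndLoop, pvScanA]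
    by_cases hq : w.toList.any pvIsQuote = true
    · have h1 : 1 ≤ pvQuoteSum w := by
        rw [pvQuoteSum_eq]
        have := (pvAny_iff _).mp hq
        omega
      rw [if_pos (by omega)]
      simp [hq]
    · have h0 : pvQuoteSum w = 0 := by
        rw [pvQuoteSum_eq]
        by_contra hc
        exact hq ((pvAny_iff _).mpr hc)
      rw [if_neg (by omega)]
      have heq : (1 + pvQuoteSum w) = 1 := by omega
      have hd : i + (w :: ws).length = (i + 1) + ws.length := by simp; omega
      rw [heq, hd]
      have htk : (w :: ws).take (pvEndLoop (ws.map pvQuoteSum) (i + 1) 1 ((i + 1) + ws.length) - i)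
          = w :: ws.take (pvEndLoop (ws.map pvQuoteSum) (i + 1) 1 ((i + 1) + ws.length) - (i + 1)) := by
        have hge' : i + 1 ≤ pvEndLoop (ws.map pvQuoteSum) (i + 1) 1 ((i + 1) + ws.length) := by
          have h := pvEndLoop_ge (ws.map pvQuoteSum) (i + 1) 1
          simpa using h
        rw [show pvEndLoop (ws.map pvQuoteSum) (i + 1) 1 ((i + 1) + ws.length) - i
            = (pvEndLoop (ws.map pvQuoteSum) (i + 1) 1 ((i + 1) + ws.length) - (i + 1)) + 1 by omega]
        rw [List.take_succ_cons]
      rw [htk, ih (i + 1)]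
      simp [hq]

theorem pvJoin_singleton (w : String) : PySem.Str.join " " [w] = w := by
  simp [PySem.Str.join, PySem.Chars.join_singleton]

theorem comment_after_spec : Claim_equal_comment_after := by
  intro comment target _hdom hpre
  obtain ⟨hmem, hlen⟩ := hpre
  unfold Spec_comment_after comment_after comment_after_alt
  have hidx : PySem.List.index? comment target = some (comment.idxOf target) := by
    rw [PySem.List.index?_eq_idxOf?]
    rw [List.idxOf_eq_getD_idxOf?]
    rcases ho : comment.idxOf? target with _ | j
    · rw [List.idxOf?_eq_none_iff] at ho
      exact absurd hmem ho
    · simp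
  rw [hidx]
  set k := comment.idxOf target with hk
  have hget : PySem.List.pyGet? comment ((k + 1 : Nat) : Int) = some comment[k + 1] := by
    rw [PySem.List.pyGet?_natCast]
    exact List.getElem?_eq_getElem hlen
  simp only [Nat.cast_add, Nat.cast_one] at hget ⊢
  rw [hget]
  dsimp only
  set w1 := comment[k + 1] with hw1
  have hslice : PySem.List.slice comment (some ((k : Int) + 1)) none = comment.drop (k + 1) := by
    have : ((k : Int) + 1) = ((k + 1 : Nat) : Int) := by push_cast; ring
    rw [this, PySem.List.slice_from_natCast]
  have hdrop : comment.drop (k + 1) = w1 :: comment.drop (k + 2) :=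
    List.drop_eq_getElem_cons hlen
  rw [hslice, hdrop]
  set ws := comment.drop (k + 2) with hws
  rw [List.map_cons]
  have hget0 : PySem.List.pyGet? (pvQuoteSum w1 :: ws.map pvQuoteSum) (0 : Int)
      = some (pvQuoteSum w1) := by
    rw [show (0 : Int) = ((0 : Nat) : Int) by norm_num, PySem.List.pyGet?_natCast]
    simp
  rw [hget0]
  dsimp only
  have hcount : pvQuoteFold w1 0 = pvQuoteSum w1 := by
    rw [pvQuoteFold_eq, pvQuoteSum_eq]; omega
  rw [hcount]
  rcases Nat.lt_or_ge (pvQuoteSum w1) 1 with h0 | h1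
  · have h0' : pvQuoteSum w1 = 0 := by omega
    simp [h0']
  · rcases Nat.lt_or_ge (pvQuoteSum w1) 2 with h1' | h2
    · -- track = 1: A takes [w1] ++ while-scan; B slices up to the cumulative-2 threshold
      have he : pvQuoteSum w1 = 1 := by omega
      rw [pvWhileA_eq]
      have hdk : comment.drop (k + 1 + 1) = ws := by rw [hws]
      rw [hdk]
      have hEnd : pvEndLoop (pvQuoteSum w1 :: ws.map pvQuoteSum) 0 0 ((w1 :: ws).length)
          = pvEndLoop (ws.map pvQuoteSum) 1 1 (1 + ws.length) := by
        rw [pvEndLoop, he, List.length_cons, Nat.add_comm ws.length 1]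
        norm_num
      have htake : (w1 :: ws).take (pvEndLoop (ws.map pvQuoteSum) 1 1 (1 + ws.length))
          = w1 :: pvScanA ws := by
        have hge : 1 ≤ pvEndLoop (ws.map pvQuoteSum) 1 1 (1 + ws.length) := by
          have h := pvEndLoop_ge (ws.map pvQuoteSum) 1 1
          simpa using h
        have hE := pvEndLoop_take ws 1
        rw [show pvEndLoop (ws.map pvQuoteSum) 1 1 (1 + ws.length)
            = (pvEndLoop (ws.map pvQuoteSum) 1 1 (1 + ws.length) - 1) + 1 by omega,
          List.take_succ_cons, hE]
      rw [hEnd, htake]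
      simp [he]
    · -- track ≥ 2: A returns just w1; B's threshold fires at index 0
      have hne0 : ¬ pvQuoteSum w1 = 0 := by omega
      have hnot1 : ¬ pvQuoteSum w1 = 1 := by omega
      have hgt : pvQuoteSum w1 > 0 := by omega
      have hEnd2 : pvEndLoop (pvQuoteSum w1 :: ws.map pvQuoteSum) 0 0 ((ws.length + 1)) = 1 := by
        rw [pvEndLoop]
        rw [if_pos (by omega)]
      simp [hne0, hnot1, hgt, hEnd2, pvJoin_singleton]
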